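-- pv_equiv track=rewrite | github.com/cdltlehf/counting-automaton | scripts/analysis_super_config_sequences.py | to_cartesian_product
-- ===== SOURCE A (Python) =====
-- CounterVector = tuple[int, ...]
--
-- def to_cartesian_product(
--     counter_vector_set: set[CounterVector],
-- ) -> list[set[int]]:
--     max_counter_variable = max(map(len, counter_vector_set))
--     counter_to_value_set: list[set[int]] = [set() for _ in range(max_counter_variable)]
--     for counter_vector in counter_vector_set:
--         for i, value in enumerate(counter_vector):
--             if value != 0:
--                 counter_to_value_set[i].add(value)
--     return counter_to_value_set
-- ===== SOURCE B (Python) =====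
-- from itertools import groupby
-- from operator import itemgetter
--
-- def to_cartesian_product(counter_vector_set):
--     # Sort-then-scan: flatten to (index, value) pairs, stably sort by index,
--     # split into runs with groupby, then project the groups over range(ncols).
--     ncols = max(map(len, counter_vector_set))
--     pairs = sorted(((i, v)
--                     for counter_vector in counter_vector_set
--                     for i, v in enumerate(counter_vector)
--                     if v != 0),
--                    key=itemgetter(0))
--     groups = {i: {v for _, v in grp}
--               for i, grp in groupby(pairs, key=itemgetter(0))}
--     return [groups.get(j, set()) for j in range(ncols)]
-- ===== Notes on version B (the rewrite author's own statement) =====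
-- stated objective: alternative
-- what changed: B replaces A's scatter into preallocated per-index accumulator sets by a sort-then-scan pipeline: flatten all vectors to (index, value) pairs, stably sort by index, split into runs with itertools.groupby, and project the resulting group dict over range(ncols).
import Mathlib
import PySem

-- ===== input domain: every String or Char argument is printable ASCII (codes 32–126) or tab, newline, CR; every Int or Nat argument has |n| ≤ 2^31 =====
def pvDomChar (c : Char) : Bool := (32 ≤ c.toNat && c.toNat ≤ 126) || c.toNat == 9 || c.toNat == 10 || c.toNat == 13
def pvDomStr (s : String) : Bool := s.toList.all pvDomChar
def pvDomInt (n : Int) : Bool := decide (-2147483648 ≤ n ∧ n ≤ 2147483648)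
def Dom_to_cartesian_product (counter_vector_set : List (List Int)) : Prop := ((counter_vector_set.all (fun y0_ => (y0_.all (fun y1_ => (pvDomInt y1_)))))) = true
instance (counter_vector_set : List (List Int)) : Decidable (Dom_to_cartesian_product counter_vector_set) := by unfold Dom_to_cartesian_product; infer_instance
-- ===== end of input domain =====

-- B flattens to (index, value) pairs, stably sorts by index and groups runs with groupby,
-- instead of A's scatter into preallocated per-index sets (alternative algorithm, sort-then-scan).


-- ===== PORT A =====
-- max(map(len, counter_vector_set)); none = ValueError on the empty set (excluded by Pre_)
def to_cartesian_product (counter_vector_set : List (List Int)) : List (List Int) :=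
  match PySem.List.max? (counter_vector_set.map (fun v => PySem.List.len v)) (fun x => x) with
  | none => []
  | some max_counter_variable =>
    -- [set() for _ in range(max_counter_variable)]
    let init : List (PySem.Set Int) :=
      (List.range max_counter_variable.toNat).map (fun _ => PySem.Set.empty)
    counter_vector_set.foldl (fun counter_to_value_set counter_vector =>
      (PySem.List.enumerate counter_vector 0).foldl (fun acc iv =>
        if iv.2 ≠ 0 then
          PySem.List.pySetD acc iv.1
            (PySem.Set.add (PySem.List.pyGetD acc iv.1 []) iv.2)
        else acc) counter_to_value_set) init

-- ===== PORT B =====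
-- itertools.groupby over the key-sorted pairs, poured into a dict comprehension
-- {i: {v for _, v in grp} for i, grp in groupby(pairs, key=itemgetter(0))}:
-- groupby yields each maximal run of equal keys (head element plus the takeWhile run),
-- the dict comprehension inserts the runs left to right; exact because pairs is key-sorted.
def pvGroupsGo (d : PySem.Dict Int (PySem.Set Int)) : List (Int × Int) → PySem.Dict Int (PySem.Set Int)
  | [] => d
  | (i, v) :: rest =>
      pvGroupsGo
        (PySem.Dict.insert d i
          (PySem.Set.ofList (v :: (rest.takeWhile (fun q => q.1 == i)).map (fun q => q.2))))
        (rest.dropWhile (fun q => q.1 == i))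
  termination_by l => l.length
  decreasing_by
    exact Nat.lt_succ_of_le (List.length_dropWhile_le _ _)

def to_cartesian_product_alt (counter_vector_set : List (List Int)) : List (List Int) :=
  match PySem.List.max? (counter_vector_set.map (fun v => PySem.List.len v)) (fun x => x) with
  | none => []
  | some ncols =>
    let pairs :=
      PySem.List.sorted
        (counter_vector_set.flatMap (fun counter_vector =>
          (PySem.List.enumerate counter_vector 0).filter (fun iv => iv.2 ≠ 0)))
        (fun p => p.1) false
    let groups := pvGroupsGo PySem.Dict.empty pairs
    (PySem.List.pyRange 0 ncols 1).map (fun j => PySem.Dict.getD groups j [])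

-- ===== PRECONDITION & SPEC =====
-- Pre_ excludes only the empty set, where both A and B raise ValueError (max() of an empty sequence).
def Pre_to_cartesian_product (counter_vector_set : List (List Int)) : Prop :=
  counter_vector_set ≠ []
instance (counter_vector_set : List (List Int)) : Decidable (Pre_to_cartesian_product counter_vector_set) := by unfold Pre_to_cartesian_product; infer_instance
def pvWitness_to_cartesian_product : List (List Int) := [[1, 0, 2], [0, 0], [3]]

def Spec_to_cartesian_product (counter_vector_set : List (List Int)) (out : List (List Int)) : Prop := out = to_cartesian_product_alt counter_vector_set
instance (counter_vector_set : List (List Int)) (out : List (List Int)) : Decidable (Spec_to_cartesian_product counter_vector_set out) := by unfold Spec_to_cartesian_product; infer_instance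

-- ===== CLAIM (what is proved, stated in full; the proofs are below) =====
def Claim_equal_to_cartesian_product : Prop := ∀ (counter_vector_set : List (List Int)), Dom_to_cartesian_product counter_vector_set → Pre_to_cartesian_product counter_vector_set → Spec_to_cartesian_product counter_vector_set (to_cartesian_product counter_vector_set)

-- ===== LEMMAS AND PROOFS =====

-- the running Int max of the lengths is the cast running Nat max
theorem pv_max_cast (t : List (List Int)) : ∀ (n : Nat),
    (t.map (fun v => (v.length : Int))).foldl max (n : Int)
      = ((t.foldl (fun m r => max m r.length) n : Nat) : Int) := by
  induction t with
  | nil => intro n; simp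
  | cons r t ih =>
    intro n
    simp only [List.map_cons, List.foldl_cons]
    rw [← Nat.cast_max, ih]

-- everything in the running max is ≤ it
theorem pv_le_foldl_max (t : List (List Int)) : ∀ (n : Nat) (r : List Int), r ∈ t →
    r.length ≤ t.foldl (fun m r => max m r.length) n := by
  induction t with
  | nil => intro _ _ h; cases h
  | cons x t ih =>
    intro n r h
    rcases List.mem_cons.mp h with rfl | h
    · exact le_trans (Nat.le_max_right n r.length)
        (PySem.List.le_foldl_max_nat t List.length (max n r.length)).1
    · exact ih _ r h

-- reading an element of a mapped range
theorem pv_getD_map_range {α : Type} (M i : Nat) (g : Nat → α) (d : α) (h : i < M) :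
    ((List.range M).map g).getD i d = g i := by
  rw [List.getD_eq_getElem?_getD, List.getElem?_map, List.getElem?_range h]
  rfl

-- setting an element of a mapped range
theorem pv_set_map_range {α : Type} (M k : Nat) (g : Nat → α) (x : α) :
    ((List.range M).map g).set k x
      = (List.range M).map (fun j => if j = k then x else g j) := by
  apply List.ext_getElem
  · simp
  · intro i h1 h2
    simp only [List.length_set, List.length_map, List.length_range] at h1
    rw [List.getElem_set]
    simp only [List.getElem_map, List.getElem_range]
    by_cases h : k = i
    · subst h; simp
    · rw [if_neg h, if_neg (fun hh => h hh.symm)]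

-- one row of A's inner loop, acting on a mapped-range accumulator
theorem pv_row (r : List Int) (M : Nat) (g : Nat → PySem.Set Int) (hle : r.length ≤ M) :
    (PySem.List.enumerate r 0).foldl (fun acc iv =>
        if iv.2 ≠ 0 then
          PySem.List.pySetD acc iv.1
            (PySem.Set.add (PySem.List.pyGetD acc iv.1 []) iv.2)
        else acc) ((List.range M).map g)
      = (List.range M).map (fun j =>
          if r.getD j 0 ≠ 0 then PySem.Set.add (g j) (r.getD j 0) else g j) := by
  induction r using List.reverseRecOn generalizing g with
  | nil =>
    simp only [PySem.List.enumerate_nil, List.foldl_nil]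
    apply List.map_congr_left
    intro j _
    simp
  | append_singleton r v ih =>
    have hlen : (r ++ [v]).length = r.length + 1 := by simp
    have hr : r.length ≤ M := by omega
    have hrM : r.length < M := by omega
    rw [PySem.List.enumerate_append, List.foldl_append, ih _ hr]
    simp only [PySem.List.enumerate_cons, PySem.List.enumerate_nil, List.foldl_cons,
      List.foldl_nil, zero_add]
    by_cases hv : v = 0
    · subst hv
      rw [if_neg (by simp)]
      apply List.map_congr_left
      intro j hj
      have hjM : j < M := List.mem_range.mp hj
      by_cases hlt : j < r.length
      · rw [List.getD_append _ _ _ _ hlt]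
      · have h0 : r.getD j 0 = 0 := List.getD_eq_default _ _ (by omega)
        have h0' : (r ++ [(0 : Int)]).getD j 0 = 0 := by
          rcases Nat.lt_or_ge j (r.length + 1) with hj1 | hj1
          · have : j = r.length := by omega
            subst this; simp
          · exact List.getD_eq_default _ _ (by simpa using hj1)
        rw [h0, h0']
    · rw [if_pos hv]
      have hcast : ((r.length : Int)) = ((r.length : Nat) : Int) := rfl
      rw [hcast, PySem.List.pySetD_natCast, PySem.List.pyGetD_natCast,
        pv_getD_map_range M r.length _ _ hrM, pv_set_map_range]
      have hgr : r.getD r.length 0 = 0 := List.getD_eq_default _ _ (le_refl _)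
      apply List.map_congr_left
      intro j hj
      have hjM : j < M := List.mem_range.mp hj
      by_cases hlt : j < r.length
      · rw [if_neg (by omega), List.getD_append _ _ _ _ hlt]
      · rcases Nat.lt_or_ge j (r.length + 1) with hj1 | hj1
        · have hje : j = r.length := by omega
          subst hje
          have h2 : (r ++ [v]).getD r.length 0 = v := by simp
          rw [if_pos rfl, hgr, h2, if_neg (by simp), if_pos hv]
        · have h0 : r.getD j 0 = 0 := List.getD_eq_default _ _ (by omega)
          have h0' : (r ++ [v]).getD j 0 = 0 := List.getD_eq_default _ _ (by simpa using hj1)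
          rw [if_neg (by omega), h0, h0']

-- A's outer loop over the rows, columnwise
theorem pv_rows (s : List (List Int)) (M : Nat) (g : Nat → PySem.Set Int)
    (hle : ∀ r ∈ s, r.length ≤ M) :
    s.foldl (fun counter_to_value_set counter_vector =>
      (PySem.List.enumerate counter_vector 0).foldl (fun acc iv =>
        if iv.2 ≠ 0 then
          PySem.List.pySetD acc iv.1
            (PySem.Set.add (PySem.List.pyGetD acc iv.1 []) iv.2)
        else acc) counter_to_value_set) ((List.range M).map g)
      = (List.range M).map (fun j =>
          s.foldl (fun st r =>
            if r.getD j 0 ≠ 0 then PySem.Set.add st (r.getD j 0) else st) (g j)) := by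
  induction s generalizing g with
  | nil => simp
  | cons r s ih =>
    simp only [List.foldl_cons]
    rw [pv_row r M g (hle r (by simp)),
      ih _ (fun r' h => hle r' (List.mem_cons_of_mem _ h))]

-- B's column set as the same fold
theorem pv_col (s : List (List Int)) (j : Nat) : ∀ (st : PySem.Set Int),
    ((s.map (fun r => r.getD j 0)).filter (fun v => v ≠ 0)).foldl PySem.Set.add st
      = s.foldl (fun st r =>
          if r.getD j 0 ≠ 0 then PySem.Set.add st (r.getD j 0) else st) st := by
  induction s with
  | nil => intro st; simp
  | cons r s ih =>
    intro st
    simp only [List.map_cons, List.filter_cons, List.foldl_cons]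
    by_cases h : r.getD j 0 = 0
    · rw [if_neg (by simpa using h), if_neg (not_not_intro h)]
      exact ih st
    · rw [if_pos (by simpa using h), List.foldl_cons, if_pos h]
      exact ih _

-- STABILITY: inserting x into a key-sorted ys puts it after all its key-mates
theorem pv_insert_filter (x : Int × Int) (j : Int) :
    ∀ (ys : List (Int × Int)), ys.Pairwise (fun a b => a.1 ≤ b.1) →
    (PySem.List.insertBy (fun a b => decide (a.1 < b.1)) x ys).filter (fun p => p.1 == j)
      = ys.filter (fun p => p.1 == j) ++ (if x.1 == j then [x] else []) := by
  intro ys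
  induction ys with
  | nil =>
    intro _
    simp [PySem.List.insertBy, List.filter_cons]
  | cons y ys ih =>
    intro hp
    simp only [PySem.List.insertBy]
    by_cases hlt : x.1 < y.1
    · rw [if_pos (by simpa using hlt)]
      by_cases hx : x.1 = j
      · have hnil : (y :: ys).filter (fun p => p.1 == j) = [] := by
          rw [List.filter_eq_nil_iff]
          intro p hpmem
          have hyp : y.1 ≤ p.1 := by
            rcases List.mem_cons.mp hpmem with rfl | h
            · exact le_refl _
            · exact (List.pairwise_cons.mp hp).1 p h
          simp only [beq_iff_eq]
          omega
        rw [List.filter_cons, if_pos (by simpa using hx), hnil, if_pos (by simpa using hx)]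
        simp
      · rw [List.filter_cons, if_neg (by simpa using hx), if_neg (by simpa using hx)]
        simp
    · rw [if_neg (by simpa using hlt), List.filter_cons, List.filter_cons,
        ih (List.pairwise_cons.mp hp).2]
      by_cases hy : y.1 = j
      · simp [hy]
      · simp [hy]

-- the stable sort by key preserves the subsequence of each key class
theorem pv_sorted_filter (xs : List (Int × Int)) (j : Int) :
    (PySem.List.sorted xs (fun p => p.1) false).filter (fun p => p.1 == j)
      = xs.filter (fun p => p.1 == j) := by
  induction xs using List.reverseRecOn with
  | nil => simp [PySem.List.sorted_eq_foldl_insertBy]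
  | append_singleton xs x ih =>
    have hfold : PySem.List.sorted (xs ++ [x]) (fun p : Int × Int => p.1) false
        = PySem.List.insertBy (fun a b => decide (a.1 < b.1)) x
            (PySem.List.sorted xs (fun p => p.1) false) := by
      rw [PySem.List.sorted_eq_foldl_insertBy, PySem.List.sorted_eq_foldl_insertBy,
        List.foldl_append, List.foldl_cons, List.foldl_nil]
    rw [hfold, pv_insert_filter x j _ (PySem.List.sorted_pairwise xs (fun p => p.1)), ih,
      List.filter_append, List.filter_cons, List.filter_nil]

-- dropWhile (key == i) of a key-sorted list whose keys are all ≥ i: survivors have key > i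
theorem pv_dropWhile_gt (i : Int) : ∀ (rest : List (Int × Int)),
    rest.Pairwise (fun a b => a.1 ≤ b.1) → (∀ p ∈ rest, i ≤ p.1) →
    ∀ p ∈ rest.dropWhile (fun q => q.1 == i), i < p.1 := by
  intro rest
  induction rest with
  | nil => intro _ _ p h; cases h
  | cons y ys ih =>
    intro hp hge p hmem
    rw [List.dropWhile_cons] at hmem
    by_cases hy : y.1 = i
    · rw [if_pos (by simpa using hy)] at hmem
      exact ih (List.pairwise_cons.mp hp).2
        (fun q hq => hge q (List.mem_cons_of_mem _ hq)) p hmem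
    · rw [if_neg (by simpa using hy)] at hmem
      have hiy : i < y.1 := lt_of_le_of_ne (hge y (by simp)) (fun h => hy h.symm)
      rcases List.mem_cons.mp hmem with rfl | h
      · exact hiy
      · exact lt_of_lt_of_le hiy ((List.pairwise_cons.mp hp).1 p h)

-- groupby + dict comprehension, looked up: the values of key class j
theorem pv_groups_getD (j : Int) : ∀ (n : Nat) (l : List (Int × Int)), l.length ≤ n →
    ∀ (d : PySem.Dict Int (PySem.Set Int)), l.Pairwise (fun a b => a.1 ≤ b.1) →
    PySem.Dict.getD (pvGroupsGo d l) j []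
      = (if (l.filter (fun p => p.1 == j)) = [] then PySem.Dict.getD d j []
         else PySem.Set.ofList ((l.filter (fun p => p.1 == j)).map (fun p => p.2))) := by
  intro n
  induction n with
  | zero =>
    intro l hl d _
    have : l = [] := List.eq_nil_of_length_eq_zero (Nat.le_zero.mp hl)
    subst this
    simp [pvGroupsGo]
  | succ n ih =>
    intro l hl d hp
    cases l with
    | nil => simp [pvGroupsGo]
    | cons p rest =>
      obtain ⟨i, v⟩ := p
      have hp' : rest.Pairwise (fun a b => a.1 ≤ b.1) := (List.pairwise_cons.mp hp).2
      have hge : ∀ p ∈ rest, i ≤ p.1 := (List.pairwise_cons.mp hp).1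
      have hgt : ∀ p ∈ rest.dropWhile (fun q => q.1 == i), i < p.1 :=
        pv_dropWhile_gt i rest hp' hge
      have htw : ∀ p ∈ rest.takeWhile (fun q => q.1 == i), p.1 = i := by
        intro p hpm
        simpa using List.mem_takeWhile_imp hpm
      have hlen : (rest.dropWhile (fun q => q.1 == i)).length ≤ n := by
        have h1 := List.length_dropWhile_le (fun q : Int × Int => q.1 == i) rest
        simp only [List.length_cons] at hl
        omega
      have hpd : (rest.dropWhile (fun q => q.1 == i)).Pairwise (fun a b => a.1 ≤ b.1) :=
        hp'.sublist (List.dropWhile_sublist _)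
      rw [show pvGroupsGo d ((i, v) :: rest)
            = pvGroupsGo
                (PySem.Dict.insert d i
                  (PySem.Set.ofList (v :: (rest.takeWhile (fun q => q.1 == i)).map (fun q => q.2))))
                (rest.dropWhile (fun q => q.1 == i)) from by rw [pvGroupsGo]]
      rw [ih _ hlen _ hpd]
      have hsplit : rest = rest.takeWhile (fun q => q.1 == i) ++ rest.dropWhile (fun q => q.1 == i) :=
        (List.takeWhile_append_dropWhile).symm
      by_cases hij : j = i
      · subst hij
        have hdw : (rest.dropWhile (fun q => q.1 == j)).filter (fun p => p.1 == j) = [] := by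
          rw [List.filter_eq_nil_iff]
          intro p hpm
          have := hgt p hpm
          simp only [beq_iff_eq]
          omega
        have htwf : (rest.takeWhile (fun q => q.1 == j)).filter (fun p => p.1 == j)
            = rest.takeWhile (fun q => q.1 == j) := by
          rw [List.filter_eq_self]
          intro p hpm
          simpa using htw p hpm
        have hrest : rest.filter (fun p => p.1 == j) = rest.takeWhile (fun q => q.1 == j) := by
          conv_lhs => rw [hsplit]
          rw [List.filter_append, htwf, hdw, List.append_nil]
        have hfl : ((j, v) :: rest).filter (fun p => p.1 == j)
            = (j, v) :: rest.takeWhile (fun q => q.1 == j) := by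
          rw [List.filter_cons, if_pos (by simp), hrest]
        rw [hdw, if_pos rfl, hfl, PySem.Dict.getD_insert, if_pos rfl]
        simp
      · have htwf : (rest.takeWhile (fun q => q.1 == i)).filter (fun p => p.1 == j) = [] := by
          rw [List.filter_eq_nil_iff]
          intro p hpm
          have := htw p hpm
          simp only [beq_iff_eq]
          omega
        have hrest : rest.filter (fun p => p.1 == j)
            = (rest.dropWhile (fun q => q.1 == i)).filter (fun p => p.1 == j) := by
          conv_lhs => rw [hsplit]
          rw [List.filter_append, htwf, List.nil_append]
        have hfl : ((i, v) :: rest).filter (fun p => p.1 == j)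
            = (rest.dropWhile (fun q => q.1 == i)).filter (fun p => p.1 == j) := by
          rw [List.filter_cons, if_neg (by simpa using fun h : i = j => hij h.symm), hrest]
        rw [hfl, PySem.Dict.getD_insert, if_neg hij]

-- one row, restricted to column j: its nonzero entry there, if any
theorem pv_row_col (r : List Int) (j : Nat) :
    (((PySem.List.enumerate r 0).filter (fun iv => iv.2 ≠ 0)).filter
        (fun p => p.1 == (j : Int))).map (fun p => p.2)
      = (if r.getD j 0 ≠ 0 then [r.getD j 0] else []) := by
  induction r using List.reverseRecOn with
  | nil => simp [PySem.List.enumerate_nil]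
  | append_singleton r v ih =>
    rw [PySem.List.enumerate_append, List.filter_append, List.filter_append, List.map_append, ih]
    simp only [PySem.List.enumerate_cons, PySem.List.enumerate_nil, zero_add]
    rcases Nat.lt_trichotomy j r.length with hlt | heq | hgt
    · have hget : (r ++ [v]).getD j 0 = r.getD j 0 := List.getD_append _ _ _ _ hlt
      have hne : ((r.length : Int) == (j : Int)) = false := by
        simp only [beq_eq_false_iff_ne, ne_eq, Int.natCast_inj]
        omega
      by_cases hv : v = 0 <;> simp [hv, hne] <;> rw [List.getElem?_append_left hlt]
    · subst heq
      have h0 : r.getD r.length 0 = 0 := List.getD_eq_default _ _ (le_refl _)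
      rw [h0]
      by_cases hv : v = 0 <;> simp [hv]
    · have hget : (r ++ [v]).getD j 0 = 0 := List.getD_eq_default _ _ (by simpa using hgt)
      have h0 : r.getD j 0 = 0 := List.getD_eq_default _ _ (by omega)
      have hne : ((r.length : Int) == (j : Int)) = false := by
        simp only [beq_eq_false_iff_ne, ne_eq, Int.natCast_inj]
        omega
      rw [hget, h0]
      by_cases hv : v = 0 <;> simp [hv, hne]

-- per column j, B's flattened-and-filtered pairs are the nonzero entries of column j
theorem pv_pairs_col (s : List (List Int)) (j : Nat) :
    ((s.flatMap (fun r => (PySem.List.enumerate r 0).filter (fun iv => iv.2 ≠ 0))).filter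
        (fun p => p.1 == (j : Int))).map (fun p => p.2)
      = (s.map (fun r => r.getD j 0)).filter (fun v => v ≠ 0) := by
  induction s with
  | nil => simp
  | cons r s ih =>
    rw [List.flatMap_cons, List.filter_append, List.map_append, ih, pv_row_col,
      List.map_cons, List.filter_cons]
    by_cases hv : r.getD j 0 = 0
    · rw [if_neg (not_not_intro hv), if_neg (by simpa using hv), List.nil_append]
    · rw [if_pos hv, if_pos (by simpa using hv)]
      simp

-- ===== VERDICT (by name: the statement is the Claim_ definition above) =====
theorem to_cartesian_product_spec : Claim_equal_to_cartesian_product := by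
  intro s _ hpre
  obtain ⟨x, t, rfl⟩ : ∃ x t, s = x :: t := by
    cases s with
    | nil => exact absurd rfl hpre
    | cons a b => exact ⟨a, b, rfl⟩
  unfold Spec_to_cartesian_product to_cartesian_product to_cartesian_product_alt
  simp only [List.map_cons, PySem.List.len_eq]
  rw [PySem.List.max?_id_cons]
  have hM : (t.map (fun v => (v.length : Int))).foldl max ((x.length : Nat) : Int)
      = (((x :: t).foldl (fun m r => max m r.length) 0 : Nat) : Int) := by
    simp only [List.foldl_cons, Nat.zero_max]
    exact pv_max_cast t x.length
  dsimp only
  rw [hM]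
  rw [Int.toNat_natCast]
  rw [pv_rows (x :: t) _ (fun _ => PySem.Set.empty)
    (fun r h => pv_le_foldl_max _ 0 r h)]
  rw [PySem.List.pyRange_zero_natCast, List.map_map]
  apply List.map_congr_left
  intro j hj
  have hps := PySem.List.sorted_pairwise
    ((x :: t).flatMap (fun r => (PySem.List.enumerate r 0).filter (fun iv => iv.2 ≠ 0)))
    (fun p : Int × Int => p.1)
  rw [Function.comp_apply,
    pv_groups_getD ((j : Nat) : Int) _ _ (le_refl _) PySem.Dict.empty hps, pv_sorted_filter]
  by_cases hnil : (((x :: t).flatMap (fun r =>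
      (PySem.List.enumerate r 0).filter (fun iv => iv.2 ≠ 0))).filter
        (fun p => p.1 == ((j : Nat) : Int))) = []
  · rw [if_pos hnil]
    have hcol : ((x :: t).map (fun r => r.getD j 0)).filter (fun v => v ≠ 0) = [] := by
      rw [← pv_pairs_col, hnil, List.map_nil]
    rw [← pv_col _ j PySem.Set.empty, hcol, PySem.Dict.getD_empty]
    rfl
  · rw [if_neg hnil, pv_pairs_col, PySem.Set.ofList_eq_foldl, pv_col]
    rfl
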